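-- pv_equiv track=rewrite | github.com/Alex-Alexiev/esc190 | exam/exam_python/Q5.py | construct_D_arr
-- ===== SOURCE A (Python) =====
-- def construct_D_arr(L1, L2):
--     D = [[0 for x in range(len(L2)+1)] for x in range(len(L1)+1)]
--     for i in range(len(L1)+1):
--         D[i][0] = i
--     for j in range(len(L2)+1):
--         D[0][j] = j
--     for i in range(1, len(L1)+1):
--         for j in range(1, len(L2)+1):
--             if L1[i-1] == L2[j-1]:
--                 #if the last element is the same, then no operation is needed
--                 D[i][j] = D[i-1][j-1]
--             else:
--                 #otherwise determine the minimum of replacing, removing, or inserting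
--                 D[i][j] = min(D[i-1][j-1], D[i-1][j], D[i][j-1]) + 1
--     return D
-- ===== SOURCE B (Python) =====
-- def construct_D_arr(L1, L2):
--     W = len(L2) + 1
--     memo = {}
--     get = memo.get
--
--     def solve(i, j):
--         if i == 0:
--             return j
--         if j == 0:
--             return i
--         k = i * W + j
--         v = get(k)
--         if v is None:
--             if L1[i - 1] == L2[j - 1]:
--                 v = solve(i - 1, j - 1)
--             else:
--                 v = 1 + min(solve(i - 1, j - 1),
--                             solve(i - 1, j),
--                             solve(i, j - 1))
--             memo[k] = v
--         return v
--
--     return [[solve(i, j) for j in range(W)]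
--             for i in range(len(L1) + 1)]
-- ===== Notes on version B (the rewrite author's own statement) =====
-- stated objective: alternative
-- what changed: B replaces A's bottom-up nested index loops mutating a preallocated grid by a top-down memoized recursion solve(i,j) over a shared dict, materializing the matrix cell by cell via comprehensions.
import Mathlib
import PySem

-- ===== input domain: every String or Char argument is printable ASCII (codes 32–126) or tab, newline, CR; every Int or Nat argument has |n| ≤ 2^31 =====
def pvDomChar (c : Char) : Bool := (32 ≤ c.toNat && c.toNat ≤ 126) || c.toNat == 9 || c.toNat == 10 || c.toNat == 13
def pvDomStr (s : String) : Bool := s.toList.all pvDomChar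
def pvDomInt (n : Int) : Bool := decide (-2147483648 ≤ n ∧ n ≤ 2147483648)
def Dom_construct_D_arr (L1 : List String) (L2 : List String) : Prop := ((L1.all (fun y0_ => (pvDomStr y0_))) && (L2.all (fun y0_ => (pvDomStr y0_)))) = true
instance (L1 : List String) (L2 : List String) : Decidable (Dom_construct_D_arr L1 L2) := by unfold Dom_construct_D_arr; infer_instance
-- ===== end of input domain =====

-- B computes the same matrix by a top-down memoized recursion over a shared dict instead of
-- A's bottom-up nested index loops mutating a preallocated grid (same asymptotic cost; return value only).

-- ===== PORT A =====
-- D[i][j] = v  (all indices produced by A's loops are nonnegative and in range, so List.set/getD are exact here)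
def setIJ (D : List (List Int)) (i j : Nat) (v : Int) : List (List Int) :=
  D.set i ((D.getD i []).set j v)

-- body of A's inner `for j in range(1, len(L2)+1)` loop, with j = j'+1
def bodyA (L1 L2 : List String) (i : Nat) (D : List (List Int)) (j' : Nat) : List (List Int) :=
  let j := j' + 1
  let v : Int :=
    if L1.getD (i-1) "" = L2.getD (j-1) "" then (D.getD (i-1) []).getD (j-1) 0
    else min ((D.getD (i-1) []).getD (j-1) 0)
         (min ((D.getD (i-1) []).getD j 0) ((D.getD i []).getD (j-1) 0)) + 1
  setIJ D i j v

def construct_D_arr (L1 : List String) (L2 : List String) : List (List Int) :=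
  let D0 := List.replicate (L1.length+1) (List.replicate (L2.length+1) (0:Int))
  let D1 := (List.range (L1.length+1)).foldl (fun D i => setIJ D i 0 (i:Int)) D0
  let D2 := (List.range (L2.length+1)).foldl (fun D j => setIJ D 0 j (j:Int)) D1
  -- `for i in range(1, len(L1)+1)`: loop variable i = i'+1
  (List.range L1.length).foldl
    (fun D i' => (List.range L2.length).foldl (bodyA L1 L2 (i'+1)) D) D2

-- ===== PORT B =====
-- B's recursive helper `solve(i, j)` with the memo dict (flat keys i*W+j, W = len(L2)+1) threaded as state
def solveB (L1 L2 : List String) : Nat → Nat → PySem.Dict Nat Int → Int × PySem.Dict Nat Int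
  | 0, j, m => ((j : Int), m)
  | i+1, 0, m => ((i : Int) + 1, m)
  | i+1, j+1, m =>
    let k := (i+1) * (L2.length+1) + (j+1)
    match m.get? k with                       -- `v = get(k); if v is None: …`
    | some v => (v, m)
    | none =>
      if L1.getD i "" = L2.getD j "" then
        let p := solveB L1 L2 i j m
        (p.1, p.2.insert k p.1)
      else
        let pa := solveB L1 L2 i j m
        let pb := solveB L1 L2 i (j+1) pa.2
        let pc := solveB L1 L2 (i+1) j pb.2
        let v := 1 + min pa.1 (min pb.1 pc.1)
        (v, pc.2.insert k v)
  termination_by i j _ => i + j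

-- the nested comprehension `[[solve(i, j) for j in range(W)] for i ...]`, threading the shared memo
def construct_D_arr_alt (L1 : List String) (L2 : List String) : List (List Int) :=
  ((List.range (L1.length+1)).foldl
    (fun (acc : List (List Int) × PySem.Dict Nat Int) i =>
      let inner := (List.range (L2.length+1)).foldl
        (fun (acc2 : List Int × PySem.Dict Nat Int) j =>
          let p := solveB L1 L2 i j acc2.2
          (acc2.1 ++ [p.1], p.2)) ([], acc.2)
      (acc.1 ++ [inner.1], inner.2))
    ([], PySem.Dict.empty)).1

-- ===== PRECONDITION & SPEC =====
def Spec_construct_D_arr (L1 : List String) (L2 : List String) (out : List (List Int)) : Prop := out = construct_D_arr_alt L1 L2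
instance (L1 : List String) (L2 : List String) (out : List (List Int)) : Decidable (Spec_construct_D_arr L1 L2 out) := by unfold Spec_construct_D_arr; infer_instance

-- ===== CLAIM (what is proved, stated in full; the proofs are below) =====
def Claim_equal_construct_D_arr : Prop := ∀ (L1 : List String) (L2 : List String), Dom_construct_D_arr L1 L2 → Spec_construct_D_arr L1 L2 (construct_D_arr L1 L2)

-- ===== LEMMAS AND PROOFS =====

-- the edit-distance recurrence as a pure function (proof-side reference)
def ed (L1 L2 : List String) : Nat → Nat → Int
  | 0, j => (j : Int)
  | i+1, 0 => (i : Int) + 1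
  | i+1, j+1 =>
    if L1.getD i "" = L2.getD j "" then ed L1 L2 i j
    else min (ed L1 L2 i j) (min (ed L1 L2 i (j+1)) (ed L1 L2 (i+1) j)) + 1
  termination_by i j => i + j

-- the whole-matrix reference both ports are proved equal to
def edMat (L1 L2 : List String) : List (List Int) :=
  (List.range (L1.length+1)).map (fun i => (List.range (L2.length+1)).map (ed L1 L2 i))

-- memo invariant for B (keys decode uniquely because stored columns satisfy 1 ≤ j ≤ len L2 < W)
def InvB (L1 L2 : List String) (m : PySem.Dict Nat Int) : Prop :=
  ∀ i j v, 1 ≤ i → 1 ≤ j → j ≤ L2.length →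
    m.get? (i * (L2.length+1) + j) = some v → v = ed L1 L2 i j

lemma key_inj (W a b c d : Nat) (hb : b < W) (hd : d < W) (h : a*W+b = c*W+d) :
    a = c ∧ b = d := by
  have h1 : (a*W+b) % W = b := by
    simp [Nat.add_mod, Nat.mul_mod_left, Nat.mod_eq_of_lt hb]
  have hbd : b = d := by
    rw [← h1, h]
    simp [Nat.add_mod, Nat.mul_mod_left, Nat.mod_eq_of_lt hd]
  subst hbd
  have hac : a * W = c * W := by omega
  exact ⟨Nat.eq_of_mul_eq_mul_right (by omega) hac, rfl⟩

lemma solveB_correct (L1 L2 : List String) :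
    ∀ n i j m, i + j ≤ n → j ≤ L2.length → InvB L1 L2 m →
      (solveB L1 L2 i j m).1 = ed L1 L2 i j ∧ InvB L1 L2 (solveB L1 L2 i j m).2 := by
  intro n
  induction n with
  | zero =>
    intro i j m h hj hm
    obtain ⟨rfl, rfl⟩ : i = 0 ∧ j = 0 := by omega
    simpa [solveB, ed] using hm
  | succ n ih =>
    intro i j m h hj hm
    match i, j with
    | 0, j => simpa [solveB, ed] using hm
    | i+1, 0 => simpa [solveB, ed] using hm
    | i+1, j+1 =>
      rw [solveB]
      simp only []
      cases hg : m.get? ((i+1) * (L2.length+1) + (j+1)) with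
      | some v =>
        exact ⟨hm (i+1) (j+1) v (by omega) (by omega) hj hg, hm⟩
      | none =>
        by_cases heq : L1.getD i "" = L2.getD j ""
        · rw [if_pos heq]
          obtain ⟨h1, h2⟩ := ih i j m (by omega) (by omega) hm
          have hed : ed L1 L2 (i+1) (j+1) = ed L1 L2 i j := by rw [ed, if_pos heq]
          refine ⟨by simpa [hed] using h1, ?_⟩
          intro i' j' v' hi' hj'1 hj'2 hv
          rw [PySem.Dict.get?_insert] at hv
          split_ifs at hv with hp
          · cases hv
            obtain ⟨rfl, rfl⟩ := key_inj (L2.length+1) i' j' (i+1) (j+1)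
              (by omega) (by omega) hp
            simpa [hed] using h1
          · exact h2 i' j' v' hi' hj'1 hj'2 hv
        · rw [if_neg heq]
          obtain ⟨ha1, ha2⟩ := ih i j m (by omega) (by omega) hm
          obtain ⟨hb1, hb2⟩ := ih i (j+1) _ (by omega) hj ha2
          obtain ⟨hc1, hc2⟩ := ih (i+1) j _ (by omega) (by omega) hb2
          have hed : ed L1 L2 (i+1) (j+1)
              = min (ed L1 L2 i j) (min (ed L1 L2 i (j+1)) (ed L1 L2 (i+1) j)) + 1 := by
            rw [ed, if_neg heq]
          refine ⟨?_, ?_⟩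
          · simp only []
            rw [hed, ha1, hb1, hc1]; ring
          · intro i' j' v' hi' hj'1 hj'2 hv
            simp only [] at hv
            rw [PySem.Dict.get?_insert] at hv
            split_ifs at hv with hp
            · cases hv
              obtain ⟨rfl, rfl⟩ := key_inj (L2.length+1) i' j' (i+1) (j+1)
                (by omega) (by omega) hp
              rw [hed, ha1, hb1, hc1]; ring
            · exact hc2 i' j' v' hi' hj'1 hj'2 hv

lemma foldB_inner (L1 L2 : List String) (i : Nat) :
    ∀ (l : List Nat), (∀ j ∈ l, j ≤ L2.length) →
      ∀ (acc : List Int) (m : PySem.Dict Nat Int), InvB L1 L2 m →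
      (l.foldl (fun (acc2 : List Int × PySem.Dict Nat Int) j =>
          let p := solveB L1 L2 i j acc2.2
          (acc2.1 ++ [p.1], p.2)) (acc, m)).1 = acc ++ l.map (ed L1 L2 i)
      ∧ InvB L1 L2 (l.foldl (fun (acc2 : List Int × PySem.Dict Nat Int) j =>
          let p := solveB L1 L2 i j acc2.2
          (acc2.1 ++ [p.1], p.2)) (acc, m)).2 := by
  intro l
  induction l with
  | nil => intro _ acc m hm; simpa using hm
  | cons j l ihl =>
    intro hl acc m hm
    obtain ⟨h1, h2⟩ := solveB_correct L1 L2 (i+j) i j m (le_refl _)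
      (hl j (List.mem_cons_self)) hm
    simp only [List.foldl_cons]
    obtain ⟨g1, g2⟩ := ihl (fun x hx => hl x (List.mem_cons_of_mem _ hx))
      (acc ++ [(solveB L1 L2 i j m).1]) (solveB L1 L2 i j m).2 h2
    refine ⟨?_, g2⟩
    rw [g1, h1, List.map_cons, List.append_assoc, List.singleton_append]

lemma foldB_outer (L1 L2 : List String) :
    ∀ (l : List Nat) (acc : List (List Int)) (m : PySem.Dict Nat Int), InvB L1 L2 m →
      (l.foldl (fun (acc : List (List Int) × PySem.Dict Nat Int) i =>
          let inner := (List.range (L2.length+1)).foldl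
            (fun (acc2 : List Int × PySem.Dict Nat Int) j =>
              let p := solveB L1 L2 i j acc2.2
              (acc2.1 ++ [p.1], p.2)) ([], acc.2)
          (acc.1 ++ [inner.1], inner.2)) (acc, m)).1
        = acc ++ l.map (fun i => (List.range (L2.length+1)).map (ed L1 L2 i)) := by
  intro l
  induction l with
  | nil => intro acc m _; simp
  | cons i l ihl =>
    intro acc m hm
    obtain ⟨h1, h2⟩ := foldB_inner L1 L2 i (List.range (L2.length+1))
      (fun j hj => by simpa using Nat.lt_succ_iff.mp (List.mem_range.mp hj)) [] m hm
    simp only [List.foldl_cons]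
    rw [ihl _ _ h2, h1, List.nil_append, List.map_cons, List.append_assoc, List.singleton_append]

lemma alt_eq_edMat (L1 L2 : List String) : construct_D_arr_alt L1 L2 = edMat L1 L2 := by
  have hinv : InvB L1 L2 PySem.Dict.empty := by
    intro i j v _ _ _ hv
    simp [PySem.Dict.get?_empty] at hv
  simpa [construct_D_arr_alt, edMat] using
    foldB_outer L1 L2 (List.range (L1.length+1)) [] PySem.Dict.empty hinv

-- ---------- A-side characterisation: A builds edMat row by row ----------
-- one cell of a streamed row (proof-side helper)
def cellB (w v : String) (prev new : List Int) (j : Nat) : Int :=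
  if w = v then prev.getD (j-1) 0
  else 1 + min (prev.getD (j-1) 0) (min (prev.getD j 0) (new.getD (j-1) 0))

-- the streamed next row
def rowB (w : String) (prev : List Int) (L2 : List String) (i : Int) : List Int :=
  (L2.foldl (fun (acc : List Int × Nat) v =>
      let j := acc.2 + 1
      (acc.1 ++ [cellB w v prev acc.1 j], j)) ([i], 0)).1

-- all streamed rows
def rowsB (L2 : List String) : List String → List Int → Int → List (List Int)
  | [], _, _ => []
  | w :: ws, prev, i => let nr := rowB w prev L2 i; nr :: rowsB L2 ws nr (i+1)

lemma foldl_set_col0 (n : Nat) (D : List (List Int)) :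
    (List.range n).foldl (fun D i => setIJ D i 0 (i:Int)) D
      = D.mapIdx (fun i r => if i < n then r.set 0 (i:Int) else r) := by
  induction n with
  | zero => apply List.ext_getElem <;> simp
  | succ n ih =>
    rw [List.range_succ, List.foldl_append, ih]
    simp only [List.foldl_cons, List.foldl_nil, setIJ]
    apply List.ext_getElem
    · simp
    · intro k h1 h2
      have hkD : k < D.length := by simpa using h2
      by_cases hn : n < D.length
      · have : ((List.mapIdx (fun i r => if i < n then r.set 0 (i:Int) else r) D).getD n [])
            = D[n] := by
          rw [List.getD_eq_getElem?_getD, List.getElem?_mapIdx,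
              List.getElem?_eq_getElem hn]
          simp
        simp only [this]
        simp only [List.getElem_set, List.getElem_mapIdx]
        split_ifs <;> first | rfl | omega | (subst_vars; rfl)
      · have hne : k ≠ n := by omega
        simp only [List.getElem_set, List.getElem_mapIdx]
        split_ifs <;> first | rfl | omega

lemma foldl_row0 (l : List Nat) : ∀ (r : List Int) (t : List (List Int)),
    l.foldl (fun D j => setIJ D 0 j (j:Int)) (r :: t)
      = (l.foldl (fun r j => r.set j (j:Int)) r) :: t := by
  induction l with
  | nil => intro r t; rfl
  | cons j l ih =>
    intro r t
    simp only [List.foldl_cons, setIJ, List.getD_cons_zero, List.set_cons_zero]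
    exact ih _ t

lemma foldl_set_row (n : Nat) (r : List Int) :
    (List.range n).foldl (fun r j => r.set j (j:Int)) r
      = r.mapIdx (fun j x => if j < n then (j:Int) else x) := by
  induction n with
  | zero => apply List.ext_getElem <;> simp
  | succ n ih =>
    rw [List.range_succ, List.foldl_append, ih]
    simp only [List.foldl_cons, List.foldl_nil]
    apply List.ext_getElem
    · simp
    · intro k h1 h2
      simp only [List.getElem_set, List.getElem_mapIdx]
      split_ifs <;> first | rfl | omega

lemma init_shape (L1 L2 : List String) :
    (List.range (L2.length+1)).foldl (fun D j => setIJ D 0 j (j:Int))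
      ((List.range (L1.length+1)).foldl (fun D i => setIJ D i 0 (i:Int))
        (List.replicate (L1.length+1) (List.replicate (L2.length+1) (0:Int))))
      = ((List.range (L2.length+1)).map (fun (j : Nat) => (j:Int)))
        :: (List.range' 1 L1.length).map (fun (t : Nat) => (t:Int) :: List.replicate L2.length 0) := by
  rw [foldl_set_col0]
  have h1 : (List.replicate (L1.length+1) (List.replicate (L2.length+1) (0:Int))).mapIdx
      (fun i r => if i < L1.length+1 then r.set 0 (i:Int) else r)
      = (List.range (L1.length+1)).map (fun (i : Nat) => (i:Int) :: List.replicate L2.length 0) := by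
    apply List.ext_getElem
    · simp
    · intro k hk1 hk2
      simp only [List.getElem_mapIdx, List.getElem_replicate, List.getElem_map, List.getElem_range]
      rw [if_pos (by simpa using hk1), List.replicate_succ, List.set_cons_zero]
  rw [h1, List.range_eq_range', List.range'_succ, List.map_cons]
  have h2 : ((0:Nat):Int) :: List.replicate L2.length 0
      = List.replicate (L2.length+1) (0:Int) := by
    rw [List.replicate_succ]; norm_num
  rw [h2, foldl_row0, foldl_set_row]
  congr 1
  apply List.ext_getElem
  · simp
  · intro k hk1 hk2
    simp only [List.getElem_mapIdx, List.getElem_replicate, List.getElem_map, List.getElem_range]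
    rw [if_pos (by simpa using hk1)]

def rowBodyA (L2 : List String) (w : String) (pv : List Int) (r : List Int) (j' : Nat) : List Int :=
  r.set (j'+1)
    (if w = L2.getD j' "" then pv.getD j' 0
     else min (pv.getD j' 0) (min (pv.getD (j'+1) 0) (r.getD j' 0)) + 1)

lemma foldl_bodyA (L1 L2 : List String) (i : Nat) (hi1 : 1 ≤ i) :
    ∀ (l : List Nat) (D : List (List Int)), i < D.length →
    l.foldl (bodyA L1 L2 i) D
      = D.set i (l.foldl (rowBodyA L2 (L1.getD (i-1) "") (D.getD (i-1) [])) (D.getD i [])) := by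
  intro l
  induction l with
  | nil =>
    intro D hD
    simp [List.getD_eq_getElem?_getD, List.getElem?_eq_getElem hD]
  | cons j' l ih =>
    intro D hD
    have hne : i - 1 ≠ i := by omega
    have hgetset : ∀ (x : List Int), (D.set i x).getD (i-1) [] = D.getD (i-1) [] := by
      intro x
      simp [List.getD_eq_getElem?_getD, List.getElem?_set_ne (by omega : i ≠ i - 1)]
    have hgetself : ∀ (x : List Int), (D.set i x).getD i [] = x := by
      intro x
      simp [List.getD_eq_getElem?_getD, hD]
    simp only [List.foldl_cons]
    have hb : bodyA L1 L2 i D j' = D.set i (rowBodyA L2 (L1.getD (i-1) "") (D.getD (i-1) []) (D.getD i []) j') := by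
      rfl
    rw [hb, ih _ (by simpa using hD)]
    rw [hgetset, hgetself, List.set_set]

lemma rowfold (L2 : List String) (w : String) (pv : List Int) :
    ∀ (tail : List String) (k : Nat) (new : List Int), new.length = k + 1 → L2.drop k = tail →
    (List.range' k tail.length).foldl (rowBodyA L2 w pv) (new ++ List.replicate tail.length 0)
      = (tail.foldl (fun (acc : List Int × Nat) v =>
          let j := acc.2 + 1
          (acc.1 ++ [cellB w v pv acc.1 j], j)) (new, k)).1 := by
  intro tail
  induction tail with
  | nil => intro k new hlen hdrop; simp
  | cons v tl ih =>
    intro k new hlen hdrop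
    have hkL : k < L2.length := by
      have := congrArg List.length hdrop
      simp at this; omega
    have hv : L2.getD k "" = v := by
      have h0 : (L2.drop k)[0]? = some v := by rw [hdrop]; rfl
      rw [List.getElem?_drop] at h0
      simp only [Nat.add_zero] at h0
      simp [List.getD_eq_getElem?_getD, h0]
    have hdrop' : L2.drop (k+1) = tl := by
      have := congrArg (List.drop 1) hdrop
      simpa [List.drop_drop, Nat.add_comm] using this
    simp only [List.length_cons, List.range'_succ, List.foldl_cons]
    have hstep : rowBodyA L2 w pv (new ++ List.replicate (tl.length + 1) 0) k
        = (new ++ [cellB w v pv new (k+1)]) ++ List.replicate tl.length 0 := by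
      simp only [rowBodyA, cellB, List.replicate_succ]
      have hk_new : k < new.length := by omega
      rw [List.getD_append _ _ _ _ hk_new]
      rw [List.set_append_right _ _ (by omega : new.length ≤ k + 1)]
      have h0 : k + 1 - new.length = 0 := by omega
      rw [h0, List.set_cons_zero, List.append_assoc, List.singleton_append]
      congr 2
      simp only [Nat.add_sub_cancel, hv]
      split_ifs with hwv
      · rfl
      · rw [Int.add_comm]
    rw [hstep]
    exact ih (k+1) (new ++ [cellB w v pv new (k+1)]) (by simp [hlen]) hdrop'

lemma getD_append_mid {α : Type} [Inhabited α] (xs ys : List α) (d : α) :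
    (xs ++ ys).getD xs.length d = ys.getD 0 d := by
  rw [List.getD_eq_getElem?_getD, List.getElem?_append_right (le_refl _), Nat.sub_self,
      List.getD_eq_getElem?_getD]

lemma outer (L1 L2 : List String) :
    ∀ (tl1 : List String) (k : Nat) (done : List (List Int)) (prev : List Int),
    done.length = k + 1 → done.getD k [] = prev → L1.drop k = tl1 →
    (List.range' k tl1.length).foldl
        (fun D i' => (List.range L2.length).foldl (bodyA L1 L2 (i'+1)) D)
        (done ++ (List.range' (k+1) tl1.length).map (fun (t : Nat) => (t:Int) :: List.replicate L2.length 0))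
      = done ++ rowsB L2 tl1 prev ((k:Int)+1) := by
  intro tl1
  induction tl1 with
  | nil => intro k done prev hlen hgd hdrop; simp [rowsB]
  | cons w ws ih =>
    intro k done prev hlen hgd hdrop
    have hw : L1.getD k "" = w := by
      have h0 : (L1.drop k)[0]? = some w := by rw [hdrop]; rfl
      rw [List.getElem?_drop] at h0
      simp only [Nat.add_zero] at h0
      simp [List.getD_eq_getElem?_getD, h0]
    have hdrop' : L1.drop (k+1) = ws := by
      have := congrArg (List.drop 1) hdrop
      simpa [List.drop_drop, Nat.add_comm] using this
    simp only [List.length_cons, List.range'_succ, List.map_cons, List.foldl_cons]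
    set D : List (List Int) := done ++ ((↑(k+1) : Int) :: List.replicate L2.length 0)
        :: (List.range' (k+1+1) ws.length).map (fun (t : Nat) => (t:Int) :: List.replicate L2.length 0) with hDdef
    have hDlen : k + 1 < D.length := by simp [hDdef, hlen]
    have hDk : D.getD k [] = prev := by
      rw [hDdef, List.getD_append _ _ _ _ (by omega), hgd]
    have hDk1 : D.getD (k+1) [] = (↑(k+1) : Int) :: List.replicate L2.length 0 := by
      have : k + 1 = done.length := by omega
      rw [hDdef, this, getD_append_mid]
      rfl
    rw [foldl_bodyA L1 L2 (k+1) (by omega) _ D hDlen]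
    have hrow : (List.range L2.length).foldl
        (rowBodyA L2 (L1.getD (k+1-1) "") (D.getD (k+1-1) [])) (D.getD (k+1) [])
        = rowB w prev L2 ((k:Int)+1) := by
      have hsub : k + 1 - 1 = k := rfl
      rw [hsub, hDk, hw, hDk1]
      have : ((↑(k+1) : Int) :: List.replicate L2.length 0)
          = [((k:Int)+1)] ++ List.replicate L2.length 0 := by push_cast; rfl
      rw [this, List.range_eq_range']
      exact rowfold L2 w prev L2 0 [((k:Int)+1)] rfl rfl
    rw [hrow]
    have hset : D.set (k+1) (rowB w prev L2 ((k:Int)+1))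
        = (done ++ [rowB w prev L2 ((k:Int)+1)])
          ++ (List.range' (k+1+1) ws.length).map (fun (t : Nat) => (t:Int) :: List.replicate L2.length 0) := by
      rw [hDdef]
      rw [List.set_append_right _ _ (by omega : done.length ≤ k + 1)]
      have h0 : k + 1 - done.length = 0 := by omega
      rw [h0, List.set_cons_zero, List.append_assoc, List.singleton_append]
    rw [hset]
    rw [ih (k+1) (done ++ [rowB w prev L2 ((k:Int)+1)]) (rowB w prev L2 ((k:Int)+1))
        (by simp [hlen]) (by rw [(by omega : k + 1 = done.length), getD_append_mid]; rfl) hdrop']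
    simp only [rowsB, List.append_assoc, List.singleton_append]
    push_cast
    ring_nf

lemma a_streaming (L1 L2 : List String) :
    construct_D_arr L1 L2
      = ((List.range (L2.length+1)).map (fun (j : Nat) => (j : Int)))
        :: rowsB L2 L1 ((List.range (L2.length+1)).map (fun (j : Nat) => (j : Int))) 1 := by
  simp only [construct_D_arr]
  rw [init_shape]
  have h := outer L1 L2 L1 0 [((List.range (L2.length+1)).map (fun (j : Nat) => (j : Int)))]
      ((List.range (L2.length+1)).map (fun (j : Nat) => (j : Int))) rfl rfl rfl
  simp only [List.singleton_append, Nat.cast_zero, zero_add] at h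
  rw [← List.range_eq_range'] at h
  exact h

-- ---------- streamed rows compute ed ----------
lemma getD_map_range (f : Nat → Int) (n t : Nat) (h : t < n) :
    ((List.range n).map f).getD t 0 = f t := by
  rw [List.getD_eq_getElem?_getD, List.getElem?_map, List.getElem?_range h]
  rfl

lemma ed_zero (L1 L2 : List String) (j : Nat) : ed L1 L2 0 j = (j : Int) := by
  rw [ed]

lemma rowB_ed (L1 L2 : List String) (k : Nat) :
    ∀ (tail : List String) (t : Nat) (new : List Int),
      t ≤ L2.length → L2.drop t = tail → new = (List.range (t+1)).map (ed L1 L2 (k+1)) →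
      (tail.foldl (fun (acc : List Int × Nat) v =>
          let j := acc.2 + 1
          (acc.1 ++ [cellB (L1.getD k "") v ((List.range (L2.length+1)).map (ed L1 L2 k)) acc.1 j], j))
        (new, t)).1
      = (List.range (L2.length+1)).map (ed L1 L2 (k+1)) := by
  intro tail
  induction tail with
  | nil =>
    intro t new hle hdrop hnew
    have ht : t = L2.length := by
      have := congrArg List.length hdrop; simp at this; omega
    simp [hnew, ht]
  | cons v tl ih =>
    intro t new hle hdrop hnew
    have htL : t < L2.length := by
      have := congrArg List.length hdrop; simp at this; omega
    have hv : L2.getD t "" = v := by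
      have h0 : (L2.drop t)[0]? = some v := by rw [hdrop]; rfl
      rw [List.getElem?_drop] at h0
      simp only [Nat.add_zero] at h0
      simp [List.getD_eq_getElem?_getD, h0]
    have hdrop' : L2.drop (t+1) = tl := by
      have := congrArg (List.drop 1) hdrop
      simpa [List.drop_drop, Nat.add_comm] using this
    simp only [List.foldl_cons]
    have hcell : cellB (L1.getD k "") v ((List.range (L2.length+1)).map (ed L1 L2 k)) new (t+1)
        = ed L1 L2 (k+1) (t+1) := by
      simp only [cellB, Nat.add_sub_cancel]
      rw [hnew, getD_map_range _ _ _ (by omega), getD_map_range _ _ _ (by omega),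
          getD_map_range _ _ _ (by omega)]
      have hedu : ed L1 L2 (k+1) (t+1)
          = if L1.getD k "" = v then ed L1 L2 k t
            else min (ed L1 L2 k t) (min (ed L1 L2 k (t+1)) (ed L1 L2 (k+1) t)) + 1 := by
        rw [ed, hv]
      rw [hedu]
      split_ifs with h
      · rfl
      · ring
    have hnew' : new ++ [cellB (L1.getD k "") v ((List.range (L2.length+1)).map (ed L1 L2 k)) new (t+1)]
        = (List.range (t+1+1)).map (ed L1 L2 (k+1)) := by
      rw [hcell, List.range_succ, List.map_append, hnew]
      rfl
    rw [hnew']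
    exact ih (t+1) _ (by omega) hdrop' rfl

lemma rowsB_ed (L1 L2 : List String) :
    ∀ (tl : List String) (k : Nat) (prev : List Int),
      L1.drop k = tl → prev = (List.range (L2.length+1)).map (ed L1 L2 k) →
      rowsB L2 tl prev ((k:Int)+1)
        = (List.range' (k+1) tl.length).map (fun i => (List.range (L2.length+1)).map (ed L1 L2 i)) := by
  intro tl
  induction tl with
  | nil => intro k prev _ _; simp [rowsB]
  | cons w ws ih =>
    intro k prev hdrop hprev
    have hw : L1.getD k "" = w := by
      have h0 : (L1.drop k)[0]? = some w := by rw [hdrop]; rfl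
      rw [List.getElem?_drop] at h0
      simp only [Nat.add_zero] at h0
      simp [List.getD_eq_getElem?_getD, h0]
    have hdrop' : L1.drop (k+1) = ws := by
      have := congrArg (List.drop 1) hdrop
      simpa [List.drop_drop, Nat.add_comm] using this
    have hrow : rowB w prev L2 ((k:Int)+1) = (List.range (L2.length+1)).map (ed L1 L2 (k+1)) := by
      have h0 : ([((k:Int)+1)] : List Int) = (List.range (0+1)).map (ed L1 L2 (k+1)) := by
        simp [ed]
      rw [rowB, ← hw, hprev]
      rw [show (([((k:Int)+1)], 0) : List Int × Nat)
            = (((List.range (0+1)).map (ed L1 L2 (k+1)), 0) : List Int × Nat) from by rw [← h0]]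
      exact rowB_ed L1 L2 k L2 0 _ (by omega) rfl rfl
    simp only [rowsB, hrow]
    have hrec := ih (k+1) _ hdrop' rfl
    have hcast : ((k:Int)+1)+1 = (((k+1 : Nat)):Int)+1 := by push_cast; ring
    rw [hcast, hrec]
    simp [List.range'_succ]

lemma a_eq_edMat (L1 L2 : List String) : construct_D_arr L1 L2 = edMat L1 L2 := by
  rw [a_streaming]
  have hrow0 : (List.range (L2.length+1)).map (fun (j : Nat) => (j : Int))
      = (List.range (L2.length+1)).map (ed L1 L2 0) := by
    apply List.map_congr_left
    intro j _
    rw [ed_zero]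
  have hrows := rowsB_ed L1 L2 L1 0 ((List.range (L2.length+1)).map (ed L1 L2 0)) rfl rfl
  simp only [Nat.cast_zero, zero_add] at hrows
  rw [hrow0, hrows, edMat,
      show List.range (L1.length+1) = 0 :: List.range' 1 L1.length from by
        rw [List.range_eq_range', List.range'_succ],
      List.map_cons]

-- ===== VERDICT (by name: the statement is the Claim_ definition above) =====
theorem construct_D_arr_spec : Claim_equal_construct_D_arr := by
  intro L1 L2 _
  show construct_D_arr L1 L2 = construct_D_arr_alt L1 L2
  rw [a_eq_edMat, alt_eq_edMat]
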